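-- pv_equiv track=rewrite | github.com/oliviersamin/P11_Flask_Testing_Debugging | server.py | is_a_positive_integer
-- ===== SOURCE A (Python) =====
-- def is_a_positive_integer(string_to_check: str) -> bool:
--     """ check that the string_to_check is a positive integer and not another alphanumeric value
--         param: input type = string
--         param: output type = boolean
--     """
--     filter = ['0', '1', '2', '3', '4', '5', '6', '7', '8', '9']
--     check = ""
--     for character in string_to_check:
--         if character not in filter:
--             check = character
--             break
--     return check == ""
-- ===== SOURCE B (Python) =====
-- def is_a_positive_integer(string_to_check: str) -> bool:
--     """ check that the string_to_check is a positive integer and not another alphanumeric value """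
--     return set(string_to_check) <= set('0123456789')
-- ===== Notes on version B (the rewrite author's own statement) =====
-- stated objective: idiomatic
-- what changed: Replaces the sentinel-variable early-exit scan with building the set of the string's characters and one subset test against the digit set.
import Mathlib
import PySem

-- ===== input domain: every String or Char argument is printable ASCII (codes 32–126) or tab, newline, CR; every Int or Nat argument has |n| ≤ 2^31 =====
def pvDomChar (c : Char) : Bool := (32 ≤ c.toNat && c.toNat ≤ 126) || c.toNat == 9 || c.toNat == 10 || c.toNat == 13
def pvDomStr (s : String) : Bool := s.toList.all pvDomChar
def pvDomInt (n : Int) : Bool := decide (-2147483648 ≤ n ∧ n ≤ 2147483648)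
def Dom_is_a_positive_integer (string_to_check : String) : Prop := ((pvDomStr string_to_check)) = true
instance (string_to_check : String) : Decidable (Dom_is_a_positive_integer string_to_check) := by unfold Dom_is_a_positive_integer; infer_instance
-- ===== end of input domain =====

-- B replaces A's sentinel-variable early-exit scan by building the set of the string's
-- characters and one subset test against the digit set (idiomatic; same cost).

-- ===== PORT A =====
-- the 'for … break' loop: walk the characters, on the first one not in filter set check to it and stop
def pvALoop (filter : List Char) (cs : List Char) (check : String) : String :=
  match cs with
  | [] => check
  | c :: rest =>
      if !(filter.contains c) then String.ofList [c]
      else pvALoop filter rest check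

def is_a_positive_integer (string_to_check : String) : Bool :=
  let filter : List Char := ['0', '1', '2', '3', '4', '5', '6', '7', '8', '9']
  let check : String := ""
  let check := pvALoop filter string_to_check.toList check
  check == ""

-- ===== PORT B =====
def is_a_positive_integer_alt (string_to_check : String) : Bool :=
  PySem.Set.issubset (PySem.Set.ofList string_to_check.toList)
    (PySem.Set.ofList "0123456789".toList)

-- ===== PRECONDITION & SPEC =====
def Spec_is_a_positive_integer (string_to_check : String) (out : Bool) : Prop := out = is_a_positive_integer_alt string_to_check
instance (string_to_check : String) (out : Bool) : Decidable (Spec_is_a_positive_integer string_to_check out) := by unfold Spec_is_a_positive_integer; infer_instance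

-- ===== CLAIM (what is proved, stated in full; the proofs are below) =====
def Claim_equal_is_a_positive_integer : Prop := ∀ (string_to_check : String), Dom_is_a_positive_integer string_to_check → Spec_is_a_positive_integer string_to_check (is_a_positive_integer string_to_check)

-- ===== LEMMAS AND PROOFS =====
def pvDigits : List Char := ['0', '1', '2', '3', '4', '5', '6', '7', '8', '9']

theorem pvALoop_all (cs : List Char) :
    ((pvALoop pvDigits cs "") == "") = cs.all (fun c => pvDigits.contains c) := by
  induction cs with
  | nil => rfl
  | cons c rest ih =>
      simp only [pvALoop, List.all_cons]
      by_cases h : c ∈ pvDigits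
      · simp [h, ih]
      · have hne : (String.ofList [c] == "") = false := by
          apply beq_eq_false_iff_ne.mpr
          intro hmk
          have h2 := congrArg String.toList hmk
          rw [String.toList_ofList] at h2
          simp at h2
        simp [h, hne]

theorem pvAlt_all (cs : List Char) :
    (PySem.Set.issubset (PySem.Set.ofList cs) (PySem.Set.ofList "0123456789".toList))
      = cs.all (fun c => pvDigits.contains c) := by
  have hdig : PySem.Set.ofList "0123456789".toList = pvDigits := by decide
  rw [hdig, Bool.eq_iff_iff]
  simp [PySem.Set.issubset, List.all_eq_true, PySem.Set.mem_ofList]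

theorem pvA_all (s : String) :
    is_a_positive_integer s = s.toList.all (fun c => pvDigits.contains c) := by
  simpa [is_a_positive_integer, pvDigits] using pvALoop_all s.toList

-- ===== VERDICT (by name: the statement is the Claim_ definition above) =====
theorem is_a_positive_integer_spec : Claim_equal_is_a_positive_integer := by
  intro s _
  unfold Spec_is_a_positive_integer is_a_positive_integer_alt
  rw [pvA_all, pvAlt_all]
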